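-- pv_equiv track=rewrite | github.com/sultanalieva-s/quote_analysis_api | main/quote_analysis.py | get_longest_words
-- ===== SOURCE A (Python) =====
-- def get_longest_words(quote):
--     words = quote.split(" ")
--     max_lengths = []
--     c = 3
--     while c:
--         max_length = 0
--         max_length_word_index = 0
--
--         for i in range(0, len(words)):
--             if len(words[i]) > max_length:
--                 max_length = len(words[i])
--                 max_length_word_index = i
--
--         max_lengths.append(words[max_length_word_index])
--         words.pop(max_length_word_index)
--         c -= 1
--     return max_lengths
-- ===== SOURCE B (Python) =====
-- def get_longest_words(quote):
--     words = quote.split(" ")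
--     s = sorted(words, key=len, reverse=True)
--     return [s[0], s[1], s[2]]
-- ===== Notes on version B (the rewrite author's own statement) =====
-- stated objective: simpler
-- what changed: Replaces the three rounds of selection (scan for the first longest word, pop it) with a single stable sort by descending length and explicit access to the first three elements, which reproduces A's earliest-position tie-breaking and its IndexError on quotes with fewer than three space-separated pieces.
import Mathlib
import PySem

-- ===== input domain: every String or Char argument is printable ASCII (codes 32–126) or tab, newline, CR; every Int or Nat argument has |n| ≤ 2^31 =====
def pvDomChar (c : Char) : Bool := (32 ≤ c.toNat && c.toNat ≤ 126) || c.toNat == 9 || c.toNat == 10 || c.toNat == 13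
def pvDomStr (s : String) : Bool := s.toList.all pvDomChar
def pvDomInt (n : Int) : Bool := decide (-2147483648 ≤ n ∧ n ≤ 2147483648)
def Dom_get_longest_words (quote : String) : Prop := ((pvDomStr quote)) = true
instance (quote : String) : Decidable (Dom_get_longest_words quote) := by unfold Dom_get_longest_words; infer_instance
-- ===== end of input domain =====

-- B replaces A's three selection rounds (scan for the first longest word, pop it) by one stable
-- descending sort by length plus explicit access to the first three elements (objective: simpler).

-- ===== PORT A =====
-- inner 'for i in range(0, len(words))' computing (max_length, max_length_word_index)
def pvSelectA (words : List String) : Int × Int :=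
  (PySem.List.pyRange 0 (PySem.List.len words) 1).foldl
    (fun (st : Int × Int) i =>
      if PySem.Str.len (PySem.List.pyGetD words i "") > st.1
      then (PySem.Str.len (PySem.List.pyGetD words i ""), i) else st)
    (0, 0)

-- the 'while c' loop: append words[max_length_word_index], pop it, three times
def pvLoopA : Nat → List String → List String → List String
  | 0, _, acc => acc
  | Nat.succ c, words, acc =>
      let st := pvSelectA words
      match PySem.List.pop? words st.2 with
      | some (w, rest) => pvLoopA c rest (acc ++ [w])
      | none => acc   -- Python raises IndexError here (fewer than 3 words); excluded by Pre_

def get_longest_words (quote : String) : List String :=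
  let words := (PySem.Str.split? quote " ").getD []   -- sep " " is nonempty, so split? is always some
  pvLoopA 3 words []

-- ===== PORT B =====
def get_longest_words_alt (quote : String) : List String :=
  let words := (PySem.Str.split? quote " ").getD []   -- sep " " is nonempty, so split? is always some
  let s := PySem.List.sorted words (fun w => PySem.Str.len w) true
  match PySem.List.pyGet? s 0, PySem.List.pyGet? s 1, PySem.List.pyGet? s 2 with
  | some w0, some w1, some w2 => [w0, w1, w2]
  | _, _, _ => []   -- Python raises IndexError here (fewer than 3 words); excluded by Pre_

-- ===== PRECONDITION & SPEC =====
-- A raises IndexError (pop from an exhausted list) exactly when the quote has fewer than three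
-- space-separated pieces; B raises IndexError there too. Pre_ excludes exactly those inputs.
def Pre_get_longest_words (quote : String) : Prop :=
  3 ≤ ((PySem.Str.split? quote " ").getD []).length
instance (quote : String) : Decidable (Pre_get_longest_words quote) := by
  unfold Pre_get_longest_words; infer_instance

def pvWitness_get_longest_words : String := "aa b ccc d"

def Spec_get_longest_words (quote : String) (out : List String) : Prop := out = get_longest_words_alt quote
instance (quote : String) (out : List String) : Decidable (Spec_get_longest_words quote out) := by unfold Spec_get_longest_words; infer_instance

-- ===== CLAIM (what is proved, stated in full; the proofs are below) =====
def Claim_equal_get_longest_words : Prop := ∀ (quote : String), Dom_get_longest_words quote → Pre_get_longest_words quote → Spec_get_longest_words quote (get_longest_words quote)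

-- ===== LEMMAS AND PROOFS =====

-- first-longest selection, recursively: (first word of maximal length, the list without it)
def pvSel : List String → String × List String
  | [] => ("", [])
  | x :: xs =>
      if PySem.Str.len (pvSel xs).1 > PySem.Str.len x
      then ((pvSel xs).1, x :: (pvSel xs).2) else (x, xs)

theorem pvSel_single (x : String) : pvSel [x] = (x, []) := by
  simp [pvSel, PySem.Str.len]

theorem pvSel_snoc (ys : List String) (z : String) (h : ys ≠ []) :
    pvSel (ys ++ [z]) =
      if PySem.Str.len z > PySem.Str.len (pvSel ys).1
      then (z, ys) else ((pvSel ys).1, (pvSel ys).2 ++ [z]) := by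
  induction ys with
  | nil => exact absurd rfl h
  | cons y ys ih =>
    cases ys with
    | nil =>
      rw [show [y] ++ [z] = y :: [z] from rfl, pvSel_single,
        show pvSel (y :: [z]) =
          if PySem.Str.len (pvSel [z]).1 > PySem.Str.len y
          then ((pvSel [z]).1, y :: (pvSel [z]).2) else (y, [z]) from rfl, pvSel_single]
      split_ifs <;> simp_all
    | cons y' ys' =>
      have ih' := ih (by simp)
      rw [List.cons_append, show pvSel (y :: ((y' :: ys') ++ [z])) =
        if PySem.Str.len (pvSel ((y' :: ys') ++ [z])).1 > PySem.Str.len y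
        then ((pvSel ((y' :: ys') ++ [z])).1, y :: (pvSel ((y' :: ys') ++ [z])).2)
        else (y, (y' :: ys') ++ [z]) from rfl, ih']
      rw [show pvSel (y :: y' :: ys') =
        if PySem.Str.len (pvSel (y' :: ys')).1 > PySem.Str.len y
        then ((pvSel (y' :: ys')).1, y :: (pvSel (y' :: ys')).2)
        else (y, y' :: ys') from rfl]
      split_ifs <;> simp_all <;> omega

theorem pvSelectA_snoc (ys : List String) (z : String) :
    pvSelectA (ys ++ [z]) =
      if PySem.Str.len z > (pvSelectA ys).1
      then (PySem.Str.len z, (ys.length : Int)) else pvSelectA ys := by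
  unfold pvSelectA
  simp only [PySem.List.len_eq]
  rw [show ((ys ++ [z]).length : Int) = (ys.length : Int) + 1 by simp,
    PySem.List.pyRange_one_succ_right (by omega), List.foldl_append]
  have hcong :
      List.foldl
        (fun (st : Int × Int) i =>
          if PySem.Str.len (PySem.List.pyGetD (ys ++ [z]) i "") > st.1
          then (PySem.Str.len (PySem.List.pyGetD (ys ++ [z]) i ""), i) else st)
        (0, 0) (PySem.List.pyRange 0 (ys.length : Int) 1)
      = List.foldl
        (fun (st : Int × Int) i =>
          if PySem.Str.len (PySem.List.pyGetD ys i "") > st.1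
          then (PySem.Str.len (PySem.List.pyGetD ys i ""), i) else st)
        (0, 0) (PySem.List.pyRange 0 (ys.length : Int) 1) := by
    apply PySem.List.foldl_congr_mem
    intro acc x hx
    rw [PySem.List.mem_pyRange_one] at hx
    obtain ⟨hx0, hx1⟩ := hx
    obtain ⟨n, rfl⟩ := Int.eq_ofNat_of_zero_le hx0
    have hn : n < ys.length := by exact_mod_cast hx1
    rw [PySem.List.pyGetD_natCast, PySem.List.pyGetD_natCast,
      List.getD_append _ _ _ _ hn]
  rw [hcong]
  have hz : PySem.List.pyGetD (ys ++ [z]) ((ys.length : Nat) : Int) "" = z := by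
    rw [PySem.List.pyGetD_natCast]
    simp [List.getD_eq_getElem?_getD]
  simp only [List.foldl_cons, List.foldl_nil, hz]

-- the invariant tying A's index-scanning fold to pvSel
theorem pvSelectA_spec (ws : List String) (h : ws ≠ []) :
    (pvSelectA ws).1 = PySem.Str.len (pvSel ws).1 ∧
    ∃ n : Nat, n < ws.length ∧ (pvSelectA ws).2 = (n : Int) ∧
      (∀ hn : n < ws.length, ws[n] = (pvSel ws).1) ∧
      ws.eraseIdx n = (pvSel ws).2 := by
  induction ws using List.reverseRecOn with
  | nil => exact absurd rfl h
  | append_singleton ys z ih =>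
    cases ys with
    | nil =>
      have h1 : [] ++ [z] = [z] := rfl
      rw [h1, pvSel_single]
      have h2 : pvSelectA [z] =
          if PySem.Str.len z > (0 : Int) then (PySem.Str.len z, (0 : Int)) else (0, 0) := by
        unfold pvSelectA
        rw [show PySem.List.pyRange 0 (PySem.List.len [z]) 1 = [0] by
          simp [PySem.List.len_eq]; decide]
        simp [PySem.List.pyGetD]
      rw [h2]
      refine ⟨?_, 0, by simp, ?_, by intro _; simp, by simp⟩ <;> split_ifs <;>
        simp_all [PySem.Str.len]
    | cons y ys' =>
      have hne : (y :: ys') ≠ [] := by simp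
      obtain ⟨ih1, n, hn, hn2, hn3, hn4⟩ := ih hne
      rw [pvSelectA_snoc, pvSel_snoc _ _ hne, ih1]
      split_ifs with hcmp
      · refine ⟨rfl, (y :: ys').length, by simp, rfl, ?_, ?_⟩
        · intro _
          simp
        · rw [List.eraseIdx_append_of_length_le (le_refl _)]
          simp
      · refine ⟨ih1, n, by have := hn; simp only [List.length_append, List.length_cons, List.length_nil] at this ⊢; omega, hn2, ?_, ?_⟩
        · intro _
          rw [List.getElem_append_left hn]
          exact hn3 hn
        · rw [List.eraseIdx_append_of_lt_length hn, hn4]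

-- one snoc step of the stable insertion sort
theorem sorted_snoc (l : List String) (z : String) :
    PySem.List.sorted (l ++ [z]) (fun w => PySem.Str.len w) true =
      PySem.List.insertBy (fun a b => decide (PySem.Str.len b < PySem.Str.len a)) z
        (PySem.List.sorted l (fun w => PySem.Str.len w) true) := by
  rw [PySem.List.sorted_rev_eq_foldl_insertBy, PySem.List.sorted_rev_eq_foldl_insertBy,
    List.foldl_append]
  rfl

-- the stable descending sort starts with the first longest word, and its tail is the
-- sort of the list with that word removed
theorem sorted_eq_sel (ws : List String) (h : ws ≠ []) :
    PySem.List.sorted ws (fun w => PySem.Str.len w) true =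
      (pvSel ws).1 :: PySem.List.sorted (pvSel ws).2 (fun w => PySem.Str.len w) true := by
  induction ws using List.reverseRecOn with
  | nil => exact absurd rfl h
  | append_singleton ys z ih =>
    cases ys with
    | nil =>
      rw [show ([] : List String) ++ [z] = [z] from rfl, pvSel_single]
      simp [PySem.List.sorted_rev_eq_foldl_insertBy, PySem.List.insertBy]
    | cons y ys' =>
      have hne : (y :: ys') ≠ [] := by simp
      rw [sorted_snoc, ih hne, pvSel_snoc _ _ hne]
      by_cases hc : PySem.Str.len (pvSel (y :: ys')).1 < PySem.Str.len z
      · rw [if_pos hc]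
        simp only [PySem.List.insertBy, decide_eq_true_eq, if_pos hc]
        rw [← ih hne]
      · rw [if_neg hc]
        simp only [PySem.List.insertBy, decide_eq_true_eq, if_neg hc]
        rw [← sorted_snoc]

-- A's loop takes the first c elements of the stable descending sort
theorem pvLoopA_eq_take (c : Nat) (ws acc : List String) (h : c ≤ ws.length) :
    pvLoopA c ws acc =
      acc ++ (PySem.List.sorted ws (fun w => PySem.Str.len w) true).take c := by
  induction c generalizing ws acc with
  | zero => simp [pvLoopA]
  | succ c ih =>
    have hne : ws ≠ [] := by
      intro hnil; subst hnil; simp at h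
    obtain ⟨_, n, hn, hn2, hn3, hn4⟩ := pvSelectA_spec ws hne
    have hpop : PySem.List.pop? ws (pvSelectA ws).2 = some ((pvSel ws).1, (pvSel ws).2) := by
      rw [hn2, PySem.List.pop?_natCast ws n hn, hn3 hn, hn4]
    have hlen : (pvSel ws).2.length = ws.length - 1 := by
      rw [← hn4, List.length_eraseIdx_of_lt hn]
    rw [pvLoopA, hpop]
    show pvLoopA c (pvSel ws).2 (acc ++ [(pvSel ws).1]) = _
    rw [ih _ _ (by omega), sorted_eq_sel ws hne, List.take_succ_cons, List.append_assoc]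
    rfl

-- ===== VERDICT (by name: the statement is the Claim_ definition above) =====
theorem get_longest_words_spec : Claim_equal_get_longest_words := by
  intro quote _ hpre
  unfold Spec_get_longest_words get_longest_words get_longest_words_alt
  unfold Pre_get_longest_words at hpre
  set ws := (PySem.Str.split? quote " ").getD [] with hws
  rw [pvLoopA_eq_take 3 ws [] hpre, List.nil_append]
  have hslen : 3 ≤ (PySem.List.sorted ws (fun w => PySem.Str.len w) true).length := by
    rw [PySem.List.length_sorted]; exact hpre
  obtain ⟨a, b, c, t, hs⟩ : ∃ a b c t,
      PySem.List.sorted ws (fun w => PySem.Str.len w) true = a :: b :: c :: t := by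
    match hh : PySem.List.sorted ws (fun w => PySem.Str.len w) true, hslen with
    | a :: b :: c :: t, _ => exact ⟨a, b, c, t, by rw [← hh]⟩
  have h0 : PySem.List.pyGet? (a :: b :: c :: t) 0 = some a := by
    rw [show (0 : Int) = ((0 : Nat) : Int) from rfl, PySem.List.pyGet?_natCast]; rfl
  have h1 : PySem.List.pyGet? (a :: b :: c :: t) 1 = some b := by
    rw [show (1 : Int) = ((1 : Nat) : Int) from rfl, PySem.List.pyGet?_natCast]; rfl
  have h2 : PySem.List.pyGet? (a :: b :: c :: t) 2 = some c := by
    rw [show (2 : Int) = ((2 : Nat) : Int) from rfl, PySem.List.pyGet?_natCast]; rfl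
  simp only [hs, h0, h1, h2, List.take]
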